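-- pv_equiv track=rewrite | github.com/Morkaito/python_base_converter | digit.py | ret_octal_digit
-- ===== SOURCE A (Python) =====
-- def ret_octal_digit(num, op=False):
-- 	num = str(num)
-- 	octalKeys = ''
-- 	octal_values_bits = {"0":"000", "1":"001", "2":"010", "3":"011", "4":"100", "5":"101", "6":"110", "7":"111" }
-- 	if not op:
-- 		if num in octal_values_bits.keys():
-- 			return octal_values_bits[num]
-- 	else:
-- 		if num in octal_values_bits.values():
-- 			for key in octal_values_bits.keys():
-- 				if octal_values_bits[key] == num:
-- 					octalKeys += key
-- 		return octalKeys
-- ===== SOURCE B (Python) =====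
-- def ret_octal_digit(num, op=False):
--     num = str(num)
--     if not op:
--         if len(num) == 1 and num in "01234567":
--             return format(int(num), '03b')
--         return None
--     if len(num) == 3 and all(c in "01" for c in num):
--         return str(int(num, 2))
--     return ''
-- ===== Notes on version B (the rewrite author's own statement) =====
-- stated objective: simpler
-- what changed: Replaces the 8-entry lookup dictionary and the reverse key-scanning loop with direct arithmetic conversion: the forward case formats the octal digit as a 3-bit binary string, the reverse case parses the validated 3-bit string with int(num, 2).
import Mathlib
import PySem

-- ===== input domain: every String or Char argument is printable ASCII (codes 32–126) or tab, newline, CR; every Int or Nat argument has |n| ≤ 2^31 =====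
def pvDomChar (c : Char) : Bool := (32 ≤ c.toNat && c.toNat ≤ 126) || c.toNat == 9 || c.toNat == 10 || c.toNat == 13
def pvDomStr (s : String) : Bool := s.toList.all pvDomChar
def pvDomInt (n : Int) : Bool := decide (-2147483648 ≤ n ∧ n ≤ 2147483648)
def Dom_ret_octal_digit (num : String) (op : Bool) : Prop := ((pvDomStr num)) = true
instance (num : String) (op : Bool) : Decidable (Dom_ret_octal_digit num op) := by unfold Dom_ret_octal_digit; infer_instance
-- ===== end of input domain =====

-- B drops the 8-entry dictionary and its reverse scanning loop in favour of direct
-- digit↔3-bit-string arithmetic conversion (objective: simpler).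


-- ===== PORT A =====
def pvOctalDict : PySem.Dict String String :=
  PySem.Dict.ofList [("0","000"),("1","001"),("2","010"),("3","011"),
                     ("4","100"),("5","101"),("6","110"),("7","111")]

-- Python string concatenation 'octalKeys += key' is ported on List Char (String.ofList at the end), exact.
def ret_octal_digit (num : String) (op : Bool) : Option String :=
  let octal_values_bits := pvOctalDict
  if !op then
    if octal_values_bits.keys.contains num then octal_values_bits.get? num
    else none
  else
    let octalKeys : List Char :=
      if octal_values_bits.values.contains num then
        octal_values_bits.keys.foldl
          (fun acc key => if octal_values_bits.getD key "" == num then acc ++ key.toList else acc) []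
      else []
    some (String.ofList octalKeys)

-- ===== PORT B =====
-- format(int(num), '03b') for a single octal digit, ported by hand as bit extraction (exact for 0..7)
def pvBitChar (b : Nat) : Char := if b = 1 then '1' else '0'

-- single-character 'num in "01234567"' / 'c in "01"' ported as character membership (exact for length-1 needles)
def ret_octal_digit_alt (num : String) (op : Bool) : Option String :=
  if !op then
    match num.toList with
    | [c] =>
        if ("01234567".toList).contains c then
          let d := c.toNat - 48
          some (String.ofList [pvBitChar (d / 4 % 2), pvBitChar (d / 2 % 2), pvBitChar (d % 2)])
        else none
    | _ => none
  else
    match num.toList with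
    | [a, b, c] =>
        if [a, b, c].all (fun ch => ("01".toList).contains ch) then
          some (PySem.Int.toStr ((4 * (a.toNat - 48) + 2 * (b.toNat - 48) + (c.toNat - 48) : Nat) : Int))
        else some ""
    | _ => some ""

-- ===== PRECONDITION & SPEC =====
def Spec_ret_octal_digit (num : String) (op : Bool) (out : Option String) : Prop := out = ret_octal_digit_alt num op
instance (num : String) (op : Bool) (out : Option String) : Decidable (Spec_ret_octal_digit num op out) := by unfold Spec_ret_octal_digit; infer_instance

-- ===== CLAIM (what is proved, stated in full; the proofs are below) =====
def Claim_equal_ret_octal_digit : Prop := ∀ (num : String) (op : Bool), Dom_ret_octal_digit num op → Spec_ret_octal_digit num op (ret_octal_digit num op)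

-- ===== LEMMAS AND PROOFS =====
theorem eq_of_toList_eq (s : String) (t : List Char) (h : s.toList = t) : s = String.ofList t := by
  have := congrArg String.ofList h
  simpa using this

theorem keys_pvOctalDict : pvOctalDict.keys = ["0","1","2","3","4","5","6","7"] := by decide

theorem values_pvOctalDict :
    pvOctalDict.values = ["000","001","010","011","100","101","110","111"] := by decide

-- ===== VERDICT (by name: the statement is the Claim_ definition above) =====
theorem ret_octal_digit_spec : Claim_equal_ret_octal_digit := by
  intro num op _
  unfold Spec_ret_octal_digit
  by_cases h0 : num = "0"; · subst h0; cases op <;> decide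
  by_cases h1 : num = "1"; · subst h1; cases op <;> decide
  by_cases h2 : num = "2"; · subst h2; cases op <;> decide
  by_cases h3 : num = "3"; · subst h3; cases op <;> decide
  by_cases h4 : num = "4"; · subst h4; cases op <;> decide
  by_cases h5 : num = "5"; · subst h5; cases op <;> decide
  by_cases h6 : num = "6"; · subst h6; cases op <;> decide
  by_cases h7 : num = "7"; · subst h7; cases op <;> decide
  by_cases v0 : num = "000"; · subst v0; cases op <;> decide
  by_cases v1 : num = "001"; · subst v1; cases op <;> decide
  by_cases v2 : num = "010"; · subst v2; cases op <;> decide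
  by_cases v3 : num = "011"; · subst v3; cases op <;> decide
  by_cases v4 : num = "100"; · subst v4; cases op <;> decide
  by_cases v5 : num = "101"; · subst v5; cases op <;> decide
  by_cases v6 : num = "110"; · subst v6; cases op <;> decide
  by_cases v7 : num = "111"; · subst v7; cases op <;> decide
  -- num is none of the 16 literal strings: A returns none / some "", and so does B
  have hck : pvOctalDict.keys.contains num = false := by
    rw [keys_pvOctalDict]
    simp [h0, h1, h2, h3, h4, h5, h6, h7]
  have hcv : pvOctalDict.values.contains num = false := by
    rw [values_pvOctalDict]
    simp [v0, v1, v2, v3, v4, v5, v6, v7]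
  have hmk : num ∉ pvOctalDict.keys := by simpa using hck
  have hmv : num ∉ pvOctalDict.values := by simpa using hcv
  have hA : ret_octal_digit num op = if !op then none else some "" := by
    unfold ret_octal_digit
    cases op <;> simp [hmk, hmv]
  have hB : ret_octal_digit_alt num op = if !op then none else some "" := by
    unfold ret_octal_digit_alt
    cases op <;> simp only [Bool.not_true, Bool.not_false, if_true]
    · -- forward: a single character would have to be one of the eight octal digits
      rcases hL : num.toList with _ | ⟨a, _ | rest⟩
      · rfl
      · simp only []
        have hnum : num = String.ofList [a] := eq_of_toList_eq num _ hL
        have hc : ("01234567".toList).contains a = false := by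
          rw [show "01234567".toList = ['0','1','2','3','4','5','6','7'] from by decide]
          simp only [List.contains_eq_mem, decide_eq_false_iff_not]
          intro hm
          simp only [List.mem_cons, List.not_mem_nil, or_false] at hm
          rcases hm with rfl | rfl | rfl | rfl | rfl | rfl | rfl | rfl <;>
            first
              | exact h0 (hnum.trans (by decide)) | exact h1 (hnum.trans (by decide))
              | exact h2 (hnum.trans (by decide)) | exact h3 (hnum.trans (by decide))
              | exact h4 (hnum.trans (by decide)) | exact h5 (hnum.trans (by decide))
              | exact h6 (hnum.trans (by decide)) | exact h7 (hnum.trans (by decide))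
        rw [hc]
        simp
      · rfl
    · -- reverse: three binary characters would make num one of the eight 3-bit strings
      rcases hL : num.toList with _ | ⟨a, _ | ⟨b, _ | ⟨c, _ | rest⟩⟩⟩ <;> try rfl
      simp only []
      have hnum : num = String.ofList [a, b, c] := eq_of_toList_eq num _ hL
      have hall : ([a, b, c].all (fun ch => ("01".toList).contains ch)) = false := by
        rw [show "01".toList = ['0','1'] from by decide]
        simp only [List.all_cons, List.all_nil, Bool.and_true, List.contains_eq_mem,
          List.mem_cons, List.not_mem_nil, or_false]
        by_contra hcon
        rw [Bool.not_eq_false] at hcon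
        simp only [Bool.and_eq_true, decide_eq_true_eq] at hcon
        obtain ⟨ha, hb, hc⟩ := hcon
        rcases ha with rfl | rfl <;> rcases hb with rfl | rfl <;> rcases hc with rfl | rfl <;>
          first
            | exact v0 (hnum.trans (by decide)) | exact v1 (hnum.trans (by decide))
            | exact v2 (hnum.trans (by decide)) | exact v3 (hnum.trans (by decide))
            | exact v4 (hnum.trans (by decide)) | exact v5 (hnum.trans (by decide))
            | exact v6 (hnum.trans (by decide)) | exact v7 (hnum.trans (by decide))
      rw [hall]
      simp
  rw [hA, hB]
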